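-- pv_equiv track=rewrite | github.com/AsselNurmakhanova/prg-basics | 04-Functions/5/7/7 - 24.py | f
-- ===== SOURCE A (Python) =====
-- def f(expression):
--     total = 0
--     sign = 1
--     for char in expression:
--         if char.isdigit():
--             total += sign * int(char)
--         if char == '+':
--             sign = 1
--         elif char == '-':
--             sign = -1
--     return total
-- ===== SOURCE B (Python) =====
-- def f(expression):
--     # Tokenize into sign tokens and delimiter-free groups, then sum the groups.
--     groups = []
--     cur = []
--     for ch in expression:
--         if ch == '+' or ch == '-':
--             groups.append(''.join(cur))
--             groups.append(ch)
--             cur = []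
--         else:
--             cur.append(ch)
--     groups.append(''.join(cur))
--     total = 0
--     sign = 1
--     for g in groups:
--         if g == '+':
--             sign = 1
--         elif g == '-':
--             sign = -1
--         else:
--             total += sign * sum(int(c) for c in g if c.isdigit())
--     return total
-- ===== Notes on version B (the rewrite author's own statement) =====
-- stated objective: alternative
-- what changed: A tracks the current sign inside one character loop; B first tokenizes the string into sign-delimiter tokens and delimiter-free groups, then sums each group's digits under the sign set by the preceding delimiter token.
import Mathlib
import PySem

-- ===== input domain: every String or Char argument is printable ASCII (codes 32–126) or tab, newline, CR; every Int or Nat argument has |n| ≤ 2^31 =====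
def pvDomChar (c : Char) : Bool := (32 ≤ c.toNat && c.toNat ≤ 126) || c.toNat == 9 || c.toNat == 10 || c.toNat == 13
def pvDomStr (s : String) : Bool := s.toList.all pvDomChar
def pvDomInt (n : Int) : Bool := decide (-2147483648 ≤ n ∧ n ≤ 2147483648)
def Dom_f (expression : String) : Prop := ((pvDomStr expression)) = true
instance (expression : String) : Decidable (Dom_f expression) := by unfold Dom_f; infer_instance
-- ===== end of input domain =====

-- B re-decomposes A's single sign-tracking character loop as tokenize-into-groups then sum-the-groups (objective: alternative decomposition, same cost).

-- ===== PORT A =====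
-- int(char): only evaluated under char.isdigit(); on Dom these are the ASCII digits, where
-- PySem.Int.ofChars? is some, so the .getD 0 default is never the value used.
def pvDigitVal (c : Char) : Int := (PySem.Int.ofChars? [c]).getD 0

def pvStepA (st : Int × Int) (char : Char) : Int × Int :=
  let st := if PySem.Chars.isdigit char then (st.1 + st.2 * pvDigitVal char, st.2) else st
  if char = '+' then (st.1, 1)
  else if char = '-' then (st.1, -1)
  else st

def f (expression : String) : Int :=
  (expression.toList.foldl pvStepA (0, 1)).1

-- ===== PORT B =====
-- first pass: split into delimiter-free groups and '+'/'-' delimiter tokens (state = (groups, cur))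
def pvStepTok (st : List (List Char) × List Char) (ch : Char) : List (List Char) × List Char :=
  if ch = '+' ∨ ch = '-' then (st.1 ++ [st.2, [ch]], ([] : List Char))
  else (st.1, st.2 ++ [ch])

-- sum(int(c) for c in g if c.isdigit())
def pvDigitSum (g : List Char) : Int :=
  g.foldl (fun t c => if PySem.Chars.isdigit c then t + pvDigitVal c else t) 0

-- second pass over the token list
def pvStepGroup (ts : Int × Int) (g : List Char) : Int × Int :=
  if g = ['+'] then (ts.1, 1)
  else if g = ['-'] then (ts.1, -1)
  else (ts.1 + ts.2 * pvDigitSum g, ts.2)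

def f_alt (expression : String) : Int :=
  let st := expression.toList.foldl pvStepTok ([], [])
  ((st.1 ++ [st.2]).foldl pvStepGroup (0, 1)).1

-- ===== PRECONDITION & SPEC =====
def Spec_f (expression : String) (out : Int) : Prop := out = f_alt expression
instance (expression : String) (out : Int) : Decidable (Spec_f expression out) := by unfold Spec_f; infer_instance

-- ===== CLAIM (what is proved, stated in full; the proofs are below) =====
def Claim_equal_f : Prop := ∀ (expression : String), Dom_f expression → Spec_f expression (f expression)

-- ===== LEMMAS AND PROOFS =====

-- a token is a '+'/'-' delimiter singleton or delimiter-free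
def pvNoDelim (g : List Char) : Prop := '+' ∉ g ∧ '-' ∉ g
def pvWF (g : List Char) : Prop := g = ['+'] ∨ g = ['-'] ∨ pvNoDelim g

theorem pvDigitSum_shift (g : List Char) (t : Int) :
    g.foldl (fun t c => if PySem.Chars.isdigit c then t + pvDigitVal c else t) t
      = t + pvDigitSum g := by
  induction g generalizing t with
  | nil => simp [pvDigitSum]
  | cons c g ih =>
      simp only [pvDigitSum, List.foldl_cons]
      rw [ih, ih (if PySem.Chars.isdigit c then 0 + pvDigitVal c else 0)]
      split_ifs <;> ring

theorem pvStepA_nondelim (t s : Int) (c : Char) (h1 : c ≠ '+') (h2 : c ≠ '-') :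
    pvStepA (t, s) c = (t + s * (if PySem.Chars.isdigit c then pvDigitVal c else 0), s) := by
  simp only [pvStepA, h1, h2, if_false]
  split_ifs <;> simp

theorem pvFoldA_nodelim (g : List Char) (hg : pvNoDelim g) (t s : Int) :
    g.foldl pvStepA (t, s) = (t + s * pvDigitSum g, s) := by
  induction g generalizing t with
  | nil => simp [pvDigitSum]
  | cons c g ih =>
      obtain ⟨h1, h2⟩ := hg
      simp only [List.mem_cons, not_or] at h1 h2
      rw [List.foldl_cons, pvStepA_nondelim t s c (fun h => h1.1 h.symm) (fun h => h2.1 h.symm),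
        ih ⟨h1.2, h2.2⟩]
      have hs : pvDigitSum (c :: g)
          = (if PySem.Chars.isdigit c then pvDigitVal c else 0) + pvDigitSum g := by
        simp only [pvDigitSum, List.foldl_cons]
        rw [pvDigitSum_shift]
        split_ifs <;> simp [pvDigitSum]
      rw [hs]
      have harith : t + s * (if PySem.Chars.isdigit c then pvDigitVal c else 0) + s * pvDigitSum g
          = t + s * ((if PySem.Chars.isdigit c then pvDigitVal c else 0) + pvDigitSum g) := by ring
      rw [harith]

theorem pvFoldA_group (g : List Char) (hg : pvWF g) (ts : Int × Int) :
    g.foldl pvStepA ts = pvStepGroup ts g := by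
  obtain ⟨t, s⟩ := ts
  rcases hg with h | h | h
  · subst h
    have hd : PySem.Chars.isdigit '+' = false := by decide
    simp [pvStepA, pvStepGroup, hd]
  · subst h
    have hd : PySem.Chars.isdigit '-' = false := by decide
    simp [pvStepA, pvStepGroup, hd]
  · rw [pvFoldA_nodelim g h t s]
    have h1 : g ≠ ['+'] := by rintro rfl; exact h.1 (by simp)
    have h2 : g ≠ ['-'] := by rintro rfl; exact h.2 (by simp)
    simp [pvStepGroup, h1, h2]

theorem pvFoldA_flatten (groups : List (List Char)) (hg : ∀ g ∈ groups, pvWF g) (ts : Int × Int) :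
    groups.flatten.foldl pvStepA ts = groups.foldl pvStepGroup ts := by
  induction groups generalizing ts with
  | nil => simp
  | cons g gs ih =>
      simp only [List.flatten_cons, List.foldl_append, List.foldl_cons]
      rw [pvFoldA_group g (hg g (by simp)) ts]
      exact ih (fun g hg' => hg g (by simp [hg'])) _

theorem pvTok_spec (cs : List Char) (groups : List (List Char)) (cur : List Char)
    (hg : ∀ g ∈ groups, pvWF g) (hc : pvNoDelim cur) :
    (∀ g ∈ (cs.foldl pvStepTok (groups, cur)).1, pvWF g) ∧
      pvNoDelim (cs.foldl pvStepTok (groups, cur)).2 ∧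
      ((cs.foldl pvStepTok (groups, cur)).1 ++ [(cs.foldl pvStepTok (groups, cur)).2]).flatten
        = (groups ++ [cur]).flatten ++ cs := by
  induction cs generalizing groups cur with
  | nil => exact ⟨hg, hc, by simp⟩
  | cons c cs ih =>
      simp only [List.foldl_cons]
      by_cases hdelim : c = '+' ∨ c = '-'
      · have hstep : pvStepTok (groups, cur) c = (groups ++ [cur, [c]], []) := by
          simp [pvStepTok, hdelim]
        rw [hstep]
        have hg' : ∀ g ∈ groups ++ [cur, [c]], pvWF g := by
          intro g hgmem
          rcases List.mem_append.1 hgmem with h | h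
          · exact hg g h
          · simp only [List.mem_cons] at h
            rcases h with rfl | rfl | h
            · exact Or.inr (Or.inr hc)
            · rcases hdelim with rfl | rfl
              · exact Or.inl rfl
              · exact Or.inr (Or.inl rfl)
            · simp at h
        obtain ⟨w1, w2, w3⟩ := ih (groups ++ [cur, [c]]) [] hg' ⟨by simp, by simp⟩
        refine ⟨w1, w2, ?_⟩
        rw [w3]; simp
      · have hstep : pvStepTok (groups, cur) c = (groups, cur ++ [c]) := by
          simp [pvStepTok, hdelim]
        rw [hstep]
        push_neg at hdelim
        have hc' : pvNoDelim (cur ++ [c]) := by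
          constructor <;> simp <;>
            first
            | exact ⟨fun h => hc.1 h, fun h => hdelim.1 h.symm⟩
            | exact ⟨fun h => hc.2 h, fun h => hdelim.2 h.symm⟩
        obtain ⟨w1, w2, w3⟩ := ih groups (cur ++ [c]) hg hc'
        refine ⟨w1, w2, ?_⟩
        rw [w3]; simp

-- ===== VERDICT (by name: the statement is the Claim_ definition above) =====
theorem f_spec : Claim_equal_f := by
  intro expression _
  unfold Spec_f f
  obtain ⟨w1, w2, w3⟩ := pvTok_spec expression.toList [] [] (by simp) ⟨by simp, by simp⟩
  have hflat : ((expression.toList.foldl pvStepTok ([], [])).1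
      ++ [(expression.toList.foldl pvStepTok ([], [])).2]).flatten = expression.toList := by
    rw [w3]; simp
  have hwf : ∀ g ∈ (expression.toList.foldl pvStepTok ([], [])).1
      ++ [(expression.toList.foldl pvStepTok ([], [])).2], pvWF g := by
    intro g hgmem
    rcases List.mem_append.1 hgmem with h | h
    · exact w1 g h
    · simp only [List.mem_singleton] at h
      exact h ▸ Or.inr (Or.inr w2)
  have hR : f_alt expression
      = (((expression.toList.foldl pvStepTok ([], [])).1
          ++ [(expression.toList.foldl pvStepTok ([], [])).2]).foldl pvStepGroup (0, 1)).1 := rfl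
  rw [hR, ← pvFoldA_flatten _ hwf, hflat]
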